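-- pv_equiv track=rewrite | github.com/da-in/algorithm-study | Programmers - 고득점 Kit/[완전탐색] 모의고사/doha.py | solution
-- ===== SOURCE A (Python) =====
-- def solution(answers):
--     answer = []
--     n = len(answer)
--
--     arr1 = [1, 2, 3, 4, 5]
--     arr2 = [2, 1, 2, 3, 2, 4, 2, 5]
--     arr3 = [3, 3, 1, 1, 2, 2, 4, 4, 5, 5]
--
--     result = [0, 0, 0]
--
--     for i, a in enumerate(answers):
--         if a == arr1[i % 5]:
--             result[0] += 1
--         if a == arr2[i % 8]:
--             result[1] += 1
--         if a == arr3[i % 10]: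
--             result[2] += 1
--
--     max_num = max(result)
--     for i, r in enumerate(result):
--         if r == max_num:
--             answer.append(i+1)
--     return answer
-- ===== SOURCE B (Python) =====
-- def solution(answers):
--     patterns = ([1, 2, 3, 4, 5],
--                 [2, 1, 2, 3, 2, 4, 2, 5],
--                 [3, 3, 1, 1, 2, 2, 4, 4, 5, 5])
--
--     def score(full):
--         s = 0
--         rem = full
--         for a in answers:
--             p = rem[0]
--             rem = rem[1:]
--             if not rem:
--                 rem = full
--             if a == p:
--                 s += 1
--         return s
--
--     scores = [score(p) for p in patterns]
--     best = max(scores)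
--     return [i + 1 for i, r in enumerate(scores) if r == best]
-- ===== Notes on version B (the rewrite author's own statement) =====
-- stated objective: alternative
-- what changed: A walks the answers once, indexing all three fixed patterns by i%len and updating a triple of counters; B scores each pattern in its own independent pass that rotates a 'remaining pattern' list instead of modular indexing, then picks the maxima.
import Mathlib
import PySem

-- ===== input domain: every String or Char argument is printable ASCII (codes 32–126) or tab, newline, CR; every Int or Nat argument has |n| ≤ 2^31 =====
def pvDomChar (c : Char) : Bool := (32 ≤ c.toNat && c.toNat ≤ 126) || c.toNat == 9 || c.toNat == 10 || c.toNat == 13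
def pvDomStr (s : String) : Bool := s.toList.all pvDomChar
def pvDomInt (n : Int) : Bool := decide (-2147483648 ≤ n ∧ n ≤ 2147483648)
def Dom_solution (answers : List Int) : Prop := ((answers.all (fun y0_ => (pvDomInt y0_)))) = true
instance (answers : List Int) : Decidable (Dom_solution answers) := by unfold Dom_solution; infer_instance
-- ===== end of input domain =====

-- B scores each of the three fixed patterns in its own pass, rotating a remaining-pattern
-- list instead of indexing by i % len; objective: alternative (same cost, different structure).

-- ===== PORT A =====
def arrA1 : List Int := [1, 2, 3, 4, 5]
def arrA2 : List Int := [2, 1, 2, 3, 2, 4, 2, 5]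
def arrA3 : List Int := [3, 3, 1, 1, 2, 2, 4, 4, 5, 5]

-- the 'for i, a in enumerate(answers)' loop over the counter triple result = [0,0,0];
-- arr[i % len] is always in range, so getD's default is never used (exact port of arr[i % len])
def loopA : List Int → Nat → Int × Int × Int → Int × Int × Int
  | [], _, r => r
  | a :: rest, i, (r0, r1, r2) =>
      loopA rest (i + 1)
        (r0 + (if a = arrA1.getD (i % 5) 0 then 1 else 0),
         r1 + (if a = arrA2.getD (i % 8) 0 then 1 else 0),
         r2 + (if a = arrA3.getD (i % 10) 0 then 1 else 0))

-- the 'for i, r in enumerate(result): if r == max_num: answer.append(i+1)' loop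
def loopA2 : List Int → Nat → Int → List Int → List Int
  | [], _, _, acc => acc
  | r :: rest, i, m, acc =>
      loopA2 rest (i + 1) m (if r = m then acc ++ [(i : Int) + 1] else acc)

def solution (answers : List Int) : List Int :=
  let result := loopA answers 0 (0, 0, 0)
  let resultL : List Int := [result.1, result.2.1, result.2.2]
  -- max(result): list is nonempty, so max? is some and getD's default is never used
  let maxNum := (PySem.List.max? resultL (fun x => x)).getD 0
  loopA2 resultL 0 maxNum []

-- ===== PORT B =====
def patB1 : List Int := [1, 2, 3, 4, 5]
def patB2 : List Int := [2, 1, 2, 3, 2, 4, 2, 5]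
def patB3 : List Int := [3, 3, 1, 1, 2, 2, 4, 4, 5, 5]

-- Source B's score(full): walk the answers once, rotating the remaining pattern 'rem',
-- refilling it from 'full' when it empties; called with rem = full ≠ [], so the
-- [] branch for a nonempty answer list is unreachable
def cycScore : List Int → List Int → List Int → Int
  | [], _, _ => 0
  | a :: rest, full, p :: ps =>
      (if a = p then 1 else 0) + cycScore rest full (if ps.isEmpty then full else ps)
  | _ :: _, _, [] => 0

def solution_alt (answers : List Int) : List Int :=
  let scores := [patB1, patB2, patB3].map (fun p => cycScore answers p p)
  -- max(scores): nonempty, default never used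
  let best := (PySem.List.max? scores (fun x => x)).getD 0
  ((PySem.List.enumerate scores).filter (fun x => x.2 == best)).map (fun x => x.1 + 1)

-- ===== PRECONDITION & SPEC =====
def Spec_solution (answers : List Int) (out : List Int) : Prop := out = solution_alt answers
instance (answers : List Int) (out : List Int) : Decidable (Spec_solution answers out) := by unfold Spec_solution; infer_instance

-- ===== CLAIM (what is proved, stated in full; the proofs are below) =====
def Claim_equal_solution : Prop := ∀ (answers : List Int), Dom_solution answers → Spec_solution answers (solution answers)

-- ===== LEMMAS AND PROOFS =====

-- one step of B's rotating pass equals one modular-index comparison of A's pass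
lemma cyc_step1 (a : Int) (xs : List Int) (i : Nat) :
    cycScore (a :: xs) patB1 (patB1.drop (i % 5)) =
      (if a = arrA1.getD (i % 5) 0 then 1 else 0) + cycScore xs patB1 (patB1.drop ((i + 1) % 5)) := by
  rw [show (i + 1) % 5 = (i % 5 + 1) % 5 by omega]
  rcases (by omega : i % 5 = 0 ∨ i % 5 = 1 ∨ i % 5 = 2 ∨ i % 5 = 3 ∨ i % 5 = 4) with h | h | h | h | h <;>
    simp [h, cycScore, patB1, arrA1]

lemma cyc_step2 (a : Int) (xs : List Int) (i : Nat) :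
    cycScore (a :: xs) patB2 (patB2.drop (i % 8)) =
      (if a = arrA2.getD (i % 8) 0 then 1 else 0) + cycScore xs patB2 (patB2.drop ((i + 1) % 8)) := by
  rw [show (i + 1) % 8 = (i % 8 + 1) % 8 by omega]
  rcases (by omega : i % 8 = 0 ∨ i % 8 = 1 ∨ i % 8 = 2 ∨ i % 8 = 3 ∨ i % 8 = 4 ∨ i % 8 = 5 ∨ i % 8 = 6 ∨ i % 8 = 7) with
    h | h | h | h | h | h | h | h <;> simp [h, cycScore, patB2, arrA2]

lemma cyc_step3 (a : Int) (xs : List Int) (i : Nat) :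
    cycScore (a :: xs) patB3 (patB3.drop (i % 10)) =
      (if a = arrA3.getD (i % 10) 0 then 1 else 0) + cycScore xs patB3 (patB3.drop ((i + 1) % 10)) := by
  rw [show (i + 1) % 10 = (i % 10 + 1) % 10 by omega]
  rcases (by omega : i % 10 = 0 ∨ i % 10 = 1 ∨ i % 10 = 2 ∨ i % 10 = 3 ∨ i % 10 = 4 ∨ i % 10 = 5 ∨ i % 10 = 6 ∨ i % 10 = 7 ∨ i % 10 = 8 ∨ i % 10 = 9) with
    h | h | h | h | h | h | h | h | h | h <;> simp [h, cycScore, patB3, arrA3]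

-- A's interleaved counting loop computes exactly B's three rotating passes
lemma loopA_eq (xs : List Int) : ∀ (i : Nat) (r0 r1 r2 : Int),
    loopA xs i (r0, r1, r2) =
      (r0 + cycScore xs patB1 (patB1.drop (i % 5)),
       r1 + cycScore xs patB2 (patB2.drop (i % 8)),
       r2 + cycScore xs patB3 (patB3.drop (i % 10))) := by
  induction xs with
  | nil => intro i r0 r1 r2; simp [loopA, cycScore]
  | cons a xs ih =>
      intro i r0 r1 r2
      rw [loopA, ih, cyc_step1, cyc_step2, cyc_step3]
      simp [Prod.ext_iff]
      refine ⟨by ring, by ring, by ring⟩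

-- the tail (max + selection) agrees for any triple of scores
lemma tail_eq (s1 s2 s3 : Int) :
    loopA2 [s1, s2, s3] 0 ((PySem.List.max? [s1, s2, s3] (fun x => x)).getD 0) [] =
      ((PySem.List.enumerate [s1, s2, s3]).filter
          (fun x => x.2 == (PySem.List.max? [s1, s2, s3] (fun x => x)).getD 0)).map
        (fun x => x.1 + 1) := by
  simp only [PySem.List.max?_id_cons, List.foldl, Option.getD_some]
  set m := max (max s1 s2) s3 with hm
  simp [loopA2, PySem.List.enumerate, List.filter]
  by_cases h1 : s1 = m <;> by_cases h2 : s2 = m <;> by_cases h3 : s3 = m <;>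
    simp [h1, h2, h3, beq_eq_decide]

-- ===== VERDICT (by name: the statement is the Claim_ definition above) =====
theorem solution_spec : Claim_equal_solution := by
  intro answers _
  unfold Spec_solution solution solution_alt
  rw [loopA_eq answers 0 0 0 0]
  simp only [Nat.zero_mod, List.drop_zero, zero_add, List.map]
  exact tail_eq _ _ _
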